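-- pv_equiv track=rewrite | github.com/kevinren1108/leetcode | 0. OAtest/Maximum Consecutive Subarray Sum in Size of K .py | Maximum_K_Subarray
-- ===== SOURCE A (Python) =====
-- def Maximum_K_Subarray(arr, k):
--     sm = sum(arr)
--     mx = float("-inf")
--     curr = 0
--     for i in range(k - 1):
--         curr += arr[i]
--
--     for i in range(k-1, len(arr)):
--         curr += arr[i]
--         mx = max(mx, curr)
--         curr -= arr[i-k+1]
--
--     return sm - mx
-- ===== SOURCE B (Python) =====
-- def Maximum_K_Subarray(arr, k):
--     prefix = [0]
--     for x in arr:
--         prefix.append(prefix[-1] + x)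
--     windows = [prefix[i + k] - prefix[i] for i in range(len(arr) - k + 1)]
--     return prefix[len(arr)] - max(windows)
-- ===== Notes on version B (the rewrite author's own statement) =====
-- stated objective: alternative
-- what changed: Replaced A's incremental sliding window (running curr with add/subtract and a running max) by a precomputed prefix-sum table and a single scan over window differences prefix[i+k]-prefix[i]; Pre_ excludes k<=0 and k>len(arr), where A raises IndexError or returns the float inf (not an int).
-- outside the precondition, e.g. on Maximum_K_Subarray([], 1): A returns inf, B raises ValueError; on Maximum_K_Subarray([1], 0): A raises IndexError, B returns 1
import Mathlib
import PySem

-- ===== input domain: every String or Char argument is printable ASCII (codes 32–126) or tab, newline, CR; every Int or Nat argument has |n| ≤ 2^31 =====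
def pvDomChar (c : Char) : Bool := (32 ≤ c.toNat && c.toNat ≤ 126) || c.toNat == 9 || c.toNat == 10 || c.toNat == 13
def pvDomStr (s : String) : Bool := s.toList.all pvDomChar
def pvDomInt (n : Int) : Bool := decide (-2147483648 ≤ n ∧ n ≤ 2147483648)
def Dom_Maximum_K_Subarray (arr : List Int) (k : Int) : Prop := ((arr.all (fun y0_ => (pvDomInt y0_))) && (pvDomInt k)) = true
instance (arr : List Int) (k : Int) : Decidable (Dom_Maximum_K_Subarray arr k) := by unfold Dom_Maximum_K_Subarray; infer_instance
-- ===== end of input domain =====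

-- B replaces A's incremental sliding window by a prefix-sum table and one scan of
-- window differences (same O(n) cost; objective: alternative decomposition).

-- ===== PORT A =====
-- Python's 'mx = max(mx, curr)' starting from float('-inf'): none models -inf.
def pyMaxNegInf (mx : Option Int) (c : Int) : Option Int :=
  match mx with
  | none => some c
  | some m => some (max m c)

def Maximum_K_Subarray (arr : List Int) (k : Int) : Int :=
  let sm := arr.sum
  let curr0 := (PySem.List.pyRange 0 (k - 1) 1).foldl
      (fun c i => c + PySem.List.pyGetD arr i 0) 0
  let st := (PySem.List.pyRange (k - 1) (arr.length : Int) 1).foldl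
      (fun (s : Int × Option Int) i =>
        let c := s.1 + PySem.List.pyGetD arr i 0
        let m := pyMaxNegInf s.2 c
        (c - PySem.List.pyGetD arr (i - k + 1) 0, m))
      (curr0, none)
  sm - st.2.getD 0

-- ===== PORT B =====
def Maximum_K_Subarray_alt (arr : List Int) (k : Int) : Int :=
  let pre := arr.foldl (fun p x => p ++ [PySem.List.pyGetD p (-1) 0 + x]) [0]
  let windows := (PySem.List.pyRange 0 ((arr.length : Int) - k + 1) 1).map
      (fun i => PySem.List.pyGetD pre (i + k) 0 - PySem.List.pyGetD pre i 0)
  PySem.List.pyGetD pre (arr.length : Int) 0 - (PySem.List.max? windows (fun y => y)).getD 0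

-- ===== PRECONDITION & SPEC =====
-- Pre_ is exactly where the Python A returns an int: for k ≤ 0 and k > len(arr)+1 A raises
-- IndexError, and for k = len(arr)+1 it returns the float inf (not an int).
def Pre_Maximum_K_Subarray (arr : List Int) (k : Int) : Prop :=
  1 ≤ k ∧ k ≤ (arr.length : Int)
instance (arr : List Int) (k : Int) : Decidable (Pre_Maximum_K_Subarray arr k) := by
  unfold Pre_Maximum_K_Subarray; infer_instance

def pvWitness_Maximum_K_Subarray : List Int × Int := ([3, -1, 2], 2)

def Spec_Maximum_K_Subarray (arr : List Int) (k : Int) (out : Int) : Prop := out = Maximum_K_Subarray_alt arr k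
instance (arr : List Int) (k : Int) (out : Int) : Decidable (Spec_Maximum_K_Subarray arr k out) := by unfold Spec_Maximum_K_Subarray; infer_instance

-- ===== CLAIM (what is proved, stated in full; the proofs are below) =====
def Claim_equal_Maximum_K_Subarray : Prop := ∀ (arr : List Int) (k : Int), Dom_Maximum_K_Subarray arr k → Pre_Maximum_K_Subarray arr k → Spec_Maximum_K_Subarray arr k (Maximum_K_Subarray arr k)

-- ===== LEMMAS AND PROOFS =====

-- prefix sums: T arr i = sum of the first i elements
def pvT (arr : List Int) (i : Nat) : Int := (arr.take i).sum

theorem pvT_succ (arr : List Int) (i : Nat) (h : i < arr.length) :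
    pvT arr (i + 1) = pvT arr i + arr[i] := by
  simp [pvT, List.sum_take_succ arr i h]

-- B's prefix list is the table of pvT
theorem pre_spec (arr : List Int) :
    arr.foldl (fun p x => p ++ [PySem.List.pyGetD p (-1) 0 + x]) [0]
      = (List.range (arr.length + 1)).map (pvT arr) := by
  induction arr using List.reverseRecOn with
  | nil => simp [pvT]
  | append_singleton l x ih =>
    rw [List.foldl_append, List.foldl_cons, List.foldl_nil, ih]
    have hlast : (List.range (l.length + 1)).map (pvT l)
        = (List.range l.length).map (pvT l) ++ [pvT l l.length] := by
      rw [List.range_succ, List.map_append, List.map_singleton]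
    rw [hlast, PySem.List.pyGetD_neg_one_append_singleton]
    have hnext : (List.range (l.length + 1 + 1)).map (pvT (l ++ [x]))
        = (List.range (l.length + 1)).map (pvT (l ++ [x])) ++ [pvT (l ++ [x]) (l.length + 1)] := by
      rw [List.range_succ, List.map_append, List.map_singleton]
    have htake : ∀ i : Nat, i ≤ l.length → pvT (l ++ [x]) i = pvT l i := by
      intro i hi
      simp [pvT, List.take_append_of_le_length hi]
    have h1 : (List.range (l.length + 1)).map (pvT (l ++ [x]))
        = (List.range (l.length + 1)).map (pvT l) := by
      apply List.map_congr_left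
      intro i hi
      exact htake i (by simpa using Nat.lt_succ_iff.mp (List.mem_range.mp hi))
    have h2 : pvT (l ++ [x]) (l.length + 1) = pvT l l.length + x := by
      have := pvT_succ (l ++ [x]) l.length (by simp)
      simpa [htake l.length le_rfl] using this
    rw [show (l ++ [x]).length = l.length + 1 from by simp, hnext, h1, h2, hlast]

-- first-loop sum: curr0 = pvT arr j
theorem curr0_spec (arr : List Int) (j : Nat) (hj : j ≤ arr.length) (c0 : Int) :
    (PySem.List.pyRange 0 (j : Int) 1).foldl (fun c i => c + PySem.List.pyGetD arr i 0) c0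
      = c0 + pvT arr j := by
  induction j generalizing c0 with
  | zero => simp [PySem.List.pyRange_one_eq_nil, pvT]
  | succ m ih =>
    have hm : m < arr.length := by omega
    rw [show ((m + 1 : Nat) : Int) = (m : Int) + 1 by push_cast; ring,
      PySem.List.pyRange_one_succ_right (by positivity : (0 : Int) ≤ (m : Int)),
      List.foldl_append, ih (by omega), List.foldl_cons, List.foldl_nil,
      PySem.List.pyGetD_natCast, List.getD_eq_getElem _ _ hm, pvT_succ arr m hm]
    ring

-- running max over a list, starting from -inf
theorem pyMaxNegInf_foldl_some (l : List Int) (m : Int) :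
    List.foldl pyMaxNegInf (some m) l = some (l.foldl max m) := by
  induction l generalizing m with
  | nil => rfl
  | cons x t ih => simp [pyMaxNegInf, ih]

-- Python max(xs) equals the -inf running max on a cons
theorem max_agree (x : Int) (t : List Int) :
    (List.foldl pyMaxNegInf none (x :: t)).getD 0
      = ((PySem.List.max? (x :: t) (fun y => y)).getD 0) := by
  rw [PySem.List.max?_id_cons, List.foldl_cons]
  simp [pyMaxNegInf, pyMaxNegInf_foldl_some]

-- second-loop invariant for A: the Option component accumulates the window sums
theorem loopA (arr : List Int) (kn : Nat) (hk : 1 ≤ kn) :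
    ∀ (m a : Nat) (c : Int) (mx : Option Int),
      kn ≤ a + 1 → a + m = arr.length →
      c = pvT arr a - pvT arr (a + 1 - kn) →
      ((PySem.List.pyRange (a : Int) (arr.length : Int) 1).foldl
        (fun (s : Int × Option Int) i =>
          let cc := s.1 + PySem.List.pyGetD arr i 0
          let mm := pyMaxNegInf s.2 cc
          (cc - PySem.List.pyGetD arr (i - (kn : Int) + 1) 0, mm))
        (c, mx)).2
      = List.foldl pyMaxNegInf mx
          ((List.range m).map (fun j => pvT arr (a + 1 + j) - pvT arr (a + 1 + j - kn))) := by
  intro m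
  induction m with
  | zero =>
    intro a c mx _ ha _
    rw [PySem.List.pyRange_one_eq_nil (by omega)]
    simp
  | succ m ih =>
    intro a c mx hka ham hc
    have halt : a < arr.length := by omega
    rw [PySem.List.pyRange_one_cons (by exact_mod_cast halt), List.foldl_cons]
    have hg1 : PySem.List.pyGetD arr (a : Int) 0 = arr[a] := by
      rw [PySem.List.pyGetD_natCast, List.getD_eq_getElem _ _ halt]
    have hidx : ((a : Int) - (kn : Int) + 1) = ((a + 1 - kn : Nat) : Int) := by
      push_cast [Nat.cast_sub hka]; ring
    have hlt2 : a + 1 - kn < arr.length := by omega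
    have hg2 : PySem.List.pyGetD arr ((a : Int) - (kn : Int) + 1) 0 = arr[a + 1 - kn] := by
      rw [hidx, PySem.List.pyGetD_natCast, List.getD_eq_getElem _ _ hlt2]
    have hcmid : c + PySem.List.pyGetD arr (a : Int) 0
        = pvT arr (a + 1) - pvT arr (a + 1 - kn) := by
      rw [hg1, hc, pvT_succ arr a halt]; ring
    have hcnew : c + PySem.List.pyGetD arr (a : Int) 0
          - PySem.List.pyGetD arr ((a : Int) - (kn : Int) + 1) 0
        = pvT arr (a + 1) - pvT arr (a + 1 + 1 - kn) := by
      rw [hcmid, hg2]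
      have : pvT arr (a + 1 - kn + 1) = pvT arr (a + 1 - kn) + arr[a + 1 - kn] :=
        pvT_succ arr (a + 1 - kn) hlt2
      rw [show a + 1 + 1 - kn = a + 1 - kn + 1 by omega, this]
      ring
    have := ih (a + 1)
      (c + PySem.List.pyGetD arr (a : Int) 0
        - PySem.List.pyGetD arr ((a : Int) - (kn : Int) + 1) 0)
      (pyMaxNegInf mx (c + PySem.List.pyGetD arr (a : Int) 0))
      (by omega) (by omega) hcnew
    rw [show ((a : Int) + 1) = ((a + 1 : Nat) : Int) by push_cast; ring]
    rw [this]
    rw [List.range_succ_eq_map, List.map_cons, List.map_map, List.foldl_cons, hcmid]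
    congr 1
    apply List.map_congr_left
    intro j _
    simp only [Function.comp]
    congr 2 <;> omega

theorem Maximum_K_Subarray_eq (arr : List Int) (k : Int)
    (hpre : Pre_Maximum_K_Subarray arr k) :
    Maximum_K_Subarray arr k = Maximum_K_Subarray_alt arr k := by
  obtain ⟨hk1, hk2⟩ := hpre
  set n := arr.length with hn
  -- k as a natural number
  obtain ⟨kn, rfl⟩ : ∃ kn : Nat, k = (kn : Int) := ⟨k.toNat, (Int.toNat_of_nonneg (by omega)).symm⟩
  have hkn1 : 1 ≤ kn := by exact_mod_cast hk1
  have hkn2 : kn ≤ n := by exact_mod_cast hk2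
  -- A's side
  simp only [Maximum_K_Subarray]
  have hc0 : ((kn : Int) - 1) = ((kn - 1 : Nat) : Int) := by omega
  rw [hc0, curr0_spec arr (kn - 1) (by omega) 0, zero_add]
  rw [loopA arr kn hkn1 (n - kn + 1) (kn - 1) _ none (by omega) (by omega)
    (by rw [show kn - 1 + 1 - kn = 0 by omega]; simp [pvT])]
  -- B's side
  simp only [Maximum_K_Subarray_alt]
  rw [pre_spec arr]
  have hgetT : ∀ i : Nat, i ≤ n →
      PySem.List.pyGetD ((List.range (n + 1)).map (pvT arr)) (i : Int) 0 = pvT arr i := by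
    intro i hi
    rw [PySem.List.pyGetD_natCast, List.getD_eq_getElem _ _ (by simpa using by omega)]
    simp
  have hwin : ((PySem.List.pyRange 0 ((n : Int) - (kn : Int) + 1) 1).map
      (fun i => PySem.List.pyGetD ((List.range (n + 1)).map (pvT arr)) (i + (kn : Int)) 0
        - PySem.List.pyGetD ((List.range (n + 1)).map (pvT arr)) i 0))
      = (List.range (n - kn + 1)).map
          (fun j => pvT arr (kn - 1 + 1 + j) - pvT arr (kn - 1 + 1 + j - kn)) := by
    have hb : ((n : Int) - (kn : Int) + 1) = ((n - kn + 1 : Nat) : Int) := by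
      omega
    rw [hb, PySem.List.pyRange_one, Int.sub_zero, Int.toNat_natCast, List.map_map]
    apply List.map_congr_left
    intro j hj
    have hj' : j < n - kn + 1 := List.mem_range.mp hj
    simp only [Function.comp]
    have e1 : ((0 : Int) + (j : Int) + (kn : Int)) = ((j + kn : Nat) : Int) := by push_cast; ring
    have e2 : ((0 : Int) + (j : Int)) = ((j : Nat) : Int) := by push_cast; ring
    rw [e1, e2, hgetT (j + kn) (by omega), hgetT j (by omega)]
    congr 2 <;> omega
  rw [hwin, hgetT n le_rfl]
  -- both maxima agree on the (nonempty) window list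
  have hsm : arr.sum = pvT arr n := by simp [pvT, hn]
  cases hxt : (List.range (n - kn + 1)).map
      (fun j => pvT arr (kn - 1 + 1 + j) - pvT arr (kn - 1 + 1 + j - kn)) with
  | nil =>
    exfalso
    have := congrArg List.length hxt
    simp at this
  | cons x t =>
    rw [max_agree x t, hsm]

-- ===== VERDICT (by name: the statement is the Claim_ definition above) =====
theorem Maximum_K_Subarray_spec : Claim_equal_Maximum_K_Subarray := by
  intro arr k _ hpre
  unfold Spec_Maximum_K_Subarray
  exact Maximum_K_Subarray_eq arr k hpre
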